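-- pv_equiv track=rewrite | github.com/benningtoncompling/project3-ngrams-puddlecat | build_ngram_model.py | sortDictByTotalsKey
-- ===== SOURCE A (Python) =====
-- import collections
--
-- def sortDictByTotalsKey(dictt):
--     #problem here: it includes "total" which doesn't have a sub dict
--     keysList = sorted(dictt, key=lambda x: (dictt[x]["TOTAL"]))
--     keysDict = {}
--     for i in range(len(keysList)):
--         keysDict[keysList[i]] = i
--     dictt = sorted(dictt.items(), key=lambda x: keysDict.get(x[0]))
--     dictt = collections.OrderedDict(dictt)
--     return dictt
-- ===== SOURCE B (Python) =====
-- import collections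
--
-- def sortDictByTotalsKey(dictt):
--     # Single stable sort of the items by their nested TOTAL value;
--     # no intermediate key-rank index map and no second sort.
--     return collections.OrderedDict(sorted(dictt.items(), key=lambda x: x[1]["TOTAL"]))
-- ===== Notes on version B (the rewrite author's own statement) =====
-- stated objective: simpler
-- what changed: B sorts the items once, directly by their nested TOTAL value (Python's stable sort preserves A's tie order), instead of A's sort of the keys, intermediate key-to-rank dictionary, and second sort of the items by rank.
import Mathlib
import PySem

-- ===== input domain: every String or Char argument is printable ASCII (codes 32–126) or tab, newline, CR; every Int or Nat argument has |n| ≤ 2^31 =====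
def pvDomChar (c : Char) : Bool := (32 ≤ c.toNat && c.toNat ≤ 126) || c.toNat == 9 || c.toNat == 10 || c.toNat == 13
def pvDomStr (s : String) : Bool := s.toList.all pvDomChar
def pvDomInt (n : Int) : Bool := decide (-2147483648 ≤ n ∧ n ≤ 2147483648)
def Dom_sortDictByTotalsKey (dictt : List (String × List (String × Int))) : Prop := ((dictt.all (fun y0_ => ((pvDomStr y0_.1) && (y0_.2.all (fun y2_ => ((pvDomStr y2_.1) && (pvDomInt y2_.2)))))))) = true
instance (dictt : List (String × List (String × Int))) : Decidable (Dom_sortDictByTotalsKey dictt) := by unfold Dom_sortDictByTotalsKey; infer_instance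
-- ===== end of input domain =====

-- B replaces A's key-sort + key-to-rank index map + second sort of the items by a single
-- stable sort of the items by their nested TOTAL value (objective: simpler).


-- ===== PORT A =====
-- dictt[x]["TOTAL"]: two dict lookups; Python raises KeyError when one misses — Pre_ excludes
-- that, so the .getD 0 default is never reached on admitted inputs.
def pvTotalOfKey (dictt : List (String × List (String × Int))) (x : String) : Int :=
  ((PySem.Dict.get? (⟨dictt⟩ : PySem.Dict String (List (String × Int))) x).bind
    (fun v => PySem.Dict.get? (⟨v⟩ : PySem.Dict String Int) "TOTAL")).getD 0

def sortDictByTotalsKey (dictt : List (String × List (String × Int))) : List (String × List (String × Int)) :=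
  -- keysList = sorted(dictt, key=lambda x: dictt[x]["TOTAL"])  (iterating a dict yields its keys)
  let keysList := PySem.List.sorted (dictt.map Prod.fst) (fun x => pvTotalOfKey dictt x)
  -- for i in range(len(keysList)): keysDict[keysList[i]] = i   (index always in range)
  let keysDict := (List.range keysList.length).foldl
    (fun d i => PySem.Dict.insert d (keysList.getD i "") (i : Int))
    (⟨[]⟩ : PySem.Dict String Int)
  -- sorted(dictt.items(), key=lambda x: keysDict.get(x[0])); every key is in keysDict inside
  -- Pre_, so .get never yields None; OrderedDict(pairs) is the identity on this assoc list.
  PySem.List.sorted dictt (fun p => (PySem.Dict.get? keysDict p.1).getD 0)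

-- ===== PORT B =====
-- sorted(dictt.items(), key=lambda x: x[1]["TOTAL"]); KeyError excluded by Pre_ as above.
def sortDictByTotalsKey_alt (dictt : List (String × List (String × Int))) : List (String × List (String × Int)) :=
  PySem.List.sorted dictt
    (fun p => (PySem.Dict.get? (⟨p.2⟩ : PySem.Dict String Int) "TOTAL").getD 0)

-- ===== PRECONDITION & SPEC =====
-- Pre_ excludes (1) inputs whose values lack a "TOTAL" entry, on which Python A raises KeyError,
-- and (2) association lists with duplicate outer keys, which no Python dict argument can be.
def Pre_sortDictByTotalsKey (dictt : List (String × List (String × Int))) : Prop :=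
  (dictt.map Prod.fst).Nodup ∧ ∀ p ∈ dictt, "TOTAL" ∈ p.2.map Prod.fst
instance (dictt : List (String × List (String × Int))) : Decidable (Pre_sortDictByTotalsKey dictt) := by unfold Pre_sortDictByTotalsKey; infer_instance

def pvWitness_sortDictByTotalsKey : (List (String × List (String × Int))) :=
  [("b", [("TOTAL", 2), ("x", 1)]), ("a", [("TOTAL", 1)])]

def Spec_sortDictByTotalsKey (dictt : List (String × List (String × Int))) (out : List (String × List (String × Int))) : Prop := out = sortDictByTotalsKey_alt dictt
instance (dictt : List (String × List (String × Int))) (out : List (String × List (String × Int))) : Decidable (Spec_sortDictByTotalsKey dictt out) := by unfold Spec_sortDictByTotalsKey; infer_instance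

-- ===== CLAIM (what is proved, stated in full; the proofs are below) =====
def Claim_equal_sortDictByTotalsKey : Prop := ∀ (dictt : List (String × List (String × Int))), Dom_sortDictByTotalsKey dictt → Pre_sortDictByTotalsKey dictt → Spec_sortDictByTotalsKey dictt (sortDictByTotalsKey dictt)

-- ===== LEMMAS AND PROOFS =====

-- insertion is unchanged when the comparison agrees on the inserted element vs. list elements
theorem insertBy_congr {α : Type} (b1 b2 : α → α → Bool) (x : α) (ys : List α)
    (h : ∀ y ∈ ys, b1 x y = b2 x y) :
    PySem.List.insertBy b1 x ys = PySem.List.insertBy b2 x ys := by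
  induction ys with
  | nil => rfl
  | cons y ys ih =>
    simp only [PySem.List.insertBy, h y (by simp)]
    split
    · rfl
    · simp only [List.cons.injEq, true_and]
      exact ih (fun z hz => h z (by simp [hz]))

-- stable sort depends on the key only through its values on the list's elements
theorem sorted_congr {α κ : Type} [LT κ] [DecidableLT κ] (xs : List α) (k1 k2 : α → κ)
    (h : ∀ a ∈ xs, k1 a = k2 a) :
    PySem.List.sorted xs k1 = PySem.List.sorted xs k2 := by
  rw [PySem.List.sorted_eq_foldl_insertBy, PySem.List.sorted_eq_foldl_insertBy]
  suffices H : ∀ (ys acc : List α), (∀ a ∈ acc, k1 a = k2 a) → (∀ a ∈ ys, k1 a = k2 a) →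
      ys.foldl (fun acc x => PySem.List.insertBy (fun a b => decide (k1 a < k1 b)) x acc) acc =
      ys.foldl (fun acc x => PySem.List.insertBy (fun a b => decide (k2 a < k2 b)) x acc) acc by
    exact H xs [] (by simp) h
  intro ys
  induction ys with
  | nil => intro acc _ _; rfl
  | cons x ys ih =>
    intro acc hacc hxs
    simp only [List.foldl_cons]
    rw [insertBy_congr _ _ x acc
      (fun y hy => by rw [hxs x (by simp), hacc y hy])]
    exact ih _
      (fun a ha => by
        rcases (PySem.List.mem_insertBy _ x a acc).1 ha with h' | h'
        · rw [h']; exact hxs x (by simp)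
        · exact hacc a h')
      (fun a ha => hxs a (by simp [ha]))

-- stable sort commutes with map when the key factors through the map
theorem insertBy_map {α β κ : Type} [LT κ] [DecidableLT κ] (f : α → β) (k : β → κ) (x : α) :
    ∀ (acc : List α),
      (PySem.List.insertBy (fun a b => decide (k (f a) < k (f b))) x acc).map f =
      PySem.List.insertBy (fun u v => decide (k u < k v)) (f x) (acc.map f) := by
  intro acc
  induction acc with
  | nil => rfl
  | cons y ys ih =>
    simp only [PySem.List.insertBy, List.map_cons]
    split
    · simp_all
    · simp_all

-- stable sort commutes with map when the key factors through the map
theorem sorted_map {α β κ : Type} [LT κ] [DecidableLT κ] (xs : List α) (f : α → β) (k : β → κ) :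
    PySem.List.sorted (xs.map f) k = (PySem.List.sorted xs (fun a => k (f a))).map f := by
  rw [PySem.List.sorted_eq_foldl_insertBy, PySem.List.sorted_eq_foldl_insertBy, List.foldl_map]
  suffices H : ∀ (ys acc : List α),
      ys.foldl (fun acc a => PySem.List.insertBy (fun u v => decide (k u < k v)) (f a) acc)
        (acc.map f) =
      (ys.foldl (fun acc a =>
        PySem.List.insertBy (fun a b => decide (k (f a) < k (f b))) a acc) acc).map f by
    simpa using H xs []
  intro ys
  induction ys with
  | nil => intro acc; rfl
  | cons x ys ih =>
    intro acc
    simp only [List.foldl_cons]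
    rw [← insertBy_map f k x acc]
    exact ih _

-- first-match lookup in a nodup association list
theorem get?_of_mem_nodup {ν : Type} (l : List (String × ν)) (hl : (l.map Prod.fst).Nodup)
    {k : String} {v : ν} (hm : (k, v) ∈ l) :
    PySem.Dict.get? (⟨l⟩ : PySem.Dict String ν) k = some v := by
  induction l with
  | nil => exact absurd hm (List.not_mem_nil)
  | cons p l ih =>
    rw [List.mem_cons] at hm
    simp only [List.map_cons, List.nodup_cons] at hl
    rcases hm with hm | hm
    · subst hm; simp [PySem.Dict.get?, List.find?]
    · have hne : p.1 ≠ k := by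
        intro he; exact hl.1 (he ▸ (List.mem_map.mpr ⟨(k, v), hm, rfl⟩))
      have hskip : List.find? (fun q => q.1 == k) (p :: l) = List.find? (fun q => q.1 == k) l :=
        by rw [List.find?_cons_of_neg]; simp [hne]
      simpa [PySem.Dict.get?, hskip] using ih hl.2 hm

-- the rank dictionary built by A: its items list, explicitly
theorem buildRank_items (l : List String) (hl : l.Nodup) :
    ∀ n ≤ l.length,
      ((List.range n).foldl (fun d i => PySem.Dict.insert d (l.getD i "") (i : Int))
        (⟨[]⟩ : PySem.Dict String Int)).items
      = (List.range n).map (fun i => (l.getD i "", (i : Int))) := by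
  intro n hn
  induction n with
  | zero => rfl
  | succ m ih =>
    have ihh := ih (by omega)
    rw [List.range_succ, List.foldl_append]
    simp only [List.foldl_cons, List.foldl_nil, List.map_append, List.map_cons, List.map_nil]
    simp only [PySem.Dict.insert, PySem.Dict.contains] at ihh ⊢
    rw [ihh]
    have hcont : (((List.range m).map (fun i => (l.getD i "", (i : Int)))).any
        (fun p => p.1 == l.getD m "")) = false := by
      simp only [List.any_map, List.any_eq_false]
      intro i hi
      rw [List.mem_range] at hi
      simp only [Function.comp, beq_iff_eq]
      have h1 : l.getD i "" = l[i]'(by omega) := List.getD_eq_getElem l "" (by omega)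
      have h2 : l.getD m "" = l[m]'(by omega) := List.getD_eq_getElem l "" (by omega)
      rw [h1, h2]
      intro he
      exact absurd (List.Nodup.getElem_inj_iff hl |>.1 he) (by omega)
    rw [hcont]
    simp

-- rank lookup: position i of keysList maps to i
theorem buildRank_get (l : List String) (hl : l.Nodup) (i : Nat) (hi : i < l.length) :
    PySem.Dict.get? ((List.range l.length).foldl
        (fun d j => PySem.Dict.insert d (l.getD j "") (j : Int)) (⟨[]⟩ : PySem.Dict String Int))
      (l.getD i "") = some (i : Int) := by
  have hitems := buildRank_items l hl l.length le_rfl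
  have hkeys : ((List.range l.length).map (fun i => (l.getD i "", (i : Int)))).map Prod.fst = l := by
    apply List.ext_getElem
    · simp
    · intro j h1 h2
      simp only [List.getElem_map, List.getElem_range]
      exact List.getD_eq_getElem l "" (by simpa using h2)
  have hmem : (l.getD i "", (i : Int)) ∈
      (List.range l.length).map (fun i => (l.getD i "", (i : Int))) :=
    List.mem_map.mpr ⟨i, List.mem_range.mpr hi, rfl⟩
  have := get?_of_mem_nodup ((List.range l.length).map (fun i => (l.getD i "", (i : Int))))
    (by rw [hkeys]; exact hl) hmem
  -- rewrite the dict by its items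
  have hd : ((List.range l.length).foldl
      (fun d j => PySem.Dict.insert d (l.getD j "") (j : Int)) (⟨[]⟩ : PySem.Dict String Int))
      = (⟨(List.range l.length).map (fun i => (l.getD i "", (i : Int)))⟩ : PySem.Dict String Int) := by
    cases hfold : (List.range l.length).foldl
      (fun d j => PySem.Dict.insert d (l.getD j "") (j : Int)) (⟨[]⟩ : PySem.Dict String Int) with
    | mk items =>
      congr 1
      have : items = ((List.range l.length).foldl
        (fun d j => PySem.Dict.insert d (l.getD j "") (j : Int))
        (⟨[]⟩ : PySem.Dict String Int)).items := by rw [hfold]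
      rw [this, hitems]
  rw [hd]
  exact this

-- ===== VERDICT (by name: the statement is the Claim_ definition above) =====
theorem sortDictByTotalsKey_spec : Claim_equal_sortDictByTotalsKey := by
  intro dictt _ hpre
  obtain ⟨hnd, -⟩ := hpre
  have hkeyeq : ∀ p ∈ dictt, pvTotalOfKey dictt p.1 =
      (PySem.Dict.get? (⟨p.2⟩ : PySem.Dict String Int) "TOTAL").getD 0 := by
    intro p hp
    have := get?_of_mem_nodup dictt hnd (k := p.1) (v := p.2) (by simpa using hp)
    simp [pvTotalOfKey, this]
  have hT : PySem.List.sorted dictt (fun a => pvTotalOfKey dictt a.1)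
      = sortDictByTotalsKey_alt dictt := by
    unfold sortDictByTotalsKey_alt
    exact sorted_congr dictt _ _ hkeyeq
  have hKL : PySem.List.sorted (dictt.map Prod.fst) (fun x => pvTotalOfKey dictt x)
      = (sortDictByTotalsKey_alt dictt).map Prod.fst := by
    rw [sorted_map dictt Prod.fst (fun x => pvTotalOfKey dictt x), hT]
  have hperm : (sortDictByTotalsKey_alt dictt).Perm dictt := PySem.List.sorted_perm _ _ _
  have hKLnd : ((sortDictByTotalsKey_alt dictt).map Prod.fst).Nodup :=
    ((hperm.map Prod.fst).nodup_iff).2 hnd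
  have hlen : ((sortDictByTotalsKey_alt dictt).map Prod.fst).length = (sortDictByTotalsKey_alt dictt).length := by simp
  unfold Spec_sortDictByTotalsKey
  show (let keysList := PySem.List.sorted (dictt.map Prod.fst) (fun x => pvTotalOfKey dictt x);
    let keysDict := (List.range keysList.length).foldl
      (fun d i => PySem.Dict.insert d (keysList.getD i "") (i : Int))
      (⟨[]⟩ : PySem.Dict String Int);
    PySem.List.sorted dictt (fun p => (PySem.Dict.get? keysDict p.1).getD 0))
    = sortDictByTotalsKey_alt dictt
  simp only [hKL]
  apply PySem.List.sorted_eq_of_perm_of_pairwise_lt dictt (sortDictByTotalsKey_alt dictt) _ hperm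
  rw [List.pairwise_iff_getElem]
  intro i j hi hj hij
  have hrk : ∀ m (hm : m < (sortDictByTotalsKey_alt dictt).length),
      (PySem.Dict.get? (((List.range ((sortDictByTotalsKey_alt dictt).map Prod.fst).length).foldl
        (fun d k => PySem.Dict.insert d (((sortDictByTotalsKey_alt dictt).map Prod.fst).getD k "") (k : Int))
        (⟨[]⟩ : PySem.Dict String Int)))
        ((sortDictByTotalsKey_alt dictt)[m]'hm).1).getD 0 = (m : Int) := by
    intro m hm
    have hm' : m < ((sortDictByTotalsKey_alt dictt).map Prod.fst).length := by rw [hlen]; exact hm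
    have hkey : ((sortDictByTotalsKey_alt dictt)[m]'hm).1
        = ((sortDictByTotalsKey_alt dictt).map Prod.fst).getD m "" := by
      rw [List.getD_eq_getElem _ _ hm', List.getElem_map]
    rw [hkey, buildRank_get _ hKLnd m hm']
    rfl
  simp only [hrk i hi, hrk j hj]
  exact_mod_cast hij
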